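-- pv_equiv track=rewrite | github.com/pypi-data/pypi-mirror-307 | packages/arglu/arglu-2.1.4-py3-none-any.whl/arglu/graph_processing.py | get_node_viewpoint
-- ===== SOURCE A (Python) =====
-- def get_node_viewpoint(node, parents_dict):
--     relations = {"red", "green"}
--     if node not in parents_dict:
--         return "green"
--     else:
--         parent, relation = parents_dict[node]
--         parent_viewpoint = get_node_viewpoint(parent, parents_dict)
--         if relation in ["supports", "expands", 1]:
--             return parent_viewpoint
--         else:
--             return list(relations - {parent_viewpoint})[0]
-- ===== SOURCE B (Python) =====
-- def get_node_viewpoint(node, parents_dict):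
--     # Stage 1: collect the relations along the parent chain up to the root.
--     relations = []
--     while node in parents_dict:
--         parent, relation = parents_dict[node]
--         relations.append(relation)
--         node = parent
--     # Stage 2: each non-supporting relation flips the root's "green"; parity decides.
--     flips = sum(1 for r in relations if r not in ("supports", "expands", 1))
--     return "green" if flips % 2 == 0 else "red"
-- ===== Notes on version B (the rewrite author's own statement) =====
-- stated objective: idiomatic
-- what changed: Replaced the recursion that carries a color back down the call chain with a two-stage computation: an iterative walk collecting the chain's relations into a list, then a parity count of the non-supporting relations deciding green/red.
import Mathlib
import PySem

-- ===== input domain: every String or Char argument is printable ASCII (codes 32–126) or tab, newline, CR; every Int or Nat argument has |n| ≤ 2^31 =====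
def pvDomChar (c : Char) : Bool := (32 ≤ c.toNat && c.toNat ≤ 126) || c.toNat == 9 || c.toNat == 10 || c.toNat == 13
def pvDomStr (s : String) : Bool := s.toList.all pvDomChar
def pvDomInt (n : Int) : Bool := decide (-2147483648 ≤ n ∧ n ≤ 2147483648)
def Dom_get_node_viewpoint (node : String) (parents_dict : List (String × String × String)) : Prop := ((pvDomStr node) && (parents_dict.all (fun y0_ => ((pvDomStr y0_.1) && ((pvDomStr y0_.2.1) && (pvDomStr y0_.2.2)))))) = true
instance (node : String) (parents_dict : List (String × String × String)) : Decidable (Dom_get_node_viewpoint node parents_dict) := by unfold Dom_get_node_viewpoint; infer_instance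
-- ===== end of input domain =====

-- B replaces A's recursion (color carried back down the calls) with a two-stage computation:
-- collect the chain's relations into a list, then decide green/red by the parity of the count
-- of non-supporting relations; objective: idiomatic. Equivalence is claimed on acyclic chains
-- (Pre_), where A's recursion terminates.

-- dict lookup: first match in the association list (insertion-order dict convention)
def pvLookup (parents_dict : List (String × String × String)) (k : String) : Option (String × String) :=
  match parents_dict.find? (fun e => e.1 == k) with
  | none => none
  | some e => some e.2

-- ===== PORT A =====
-- A's unbounded recursion is carried by a fuel argument; under Pre_ the fuel
-- (parents_dict.length + 1) is never exhausted, so the port is exact there.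
-- 'relation in ["supports", "expands", 1]': a string never equals the int 1, so only the
-- two string tests remain.  'list({"red","green"} - {parent_viewpoint})[0]': parent_viewpoint
-- is always "red" or "green", so this is the other color.
def getA (parents_dict : List (String × String × String)) : Nat → String → String
  | 0, _ => "green"  -- unreachable under Pre_
  | fuel + 1, node =>
    match pvLookup parents_dict node with
    | none => "green"
    | some (parent, relation) =>
      let parent_viewpoint := getA parents_dict fuel parent
      if relation = "supports" ∨ relation = "expands" then parent_viewpoint
      else if parent_viewpoint = "red" then "green" else "red"

def get_node_viewpoint (node : String) (parents_dict : List (String × String × String)) : String :=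
  getA parents_dict (parents_dict.length + 1) node

-- ===== PORT B =====
-- Stage 1 of Source B: the while-loop appending each relation to 'relations' (accumulator 'acc'),
-- as a tail recursion on the same fuel.
def chainB (parents_dict : List (String × String × String)) :
    Nat → String → List String → List String
  | 0, _, acc => acc  -- unreachable under Pre_
  | fuel + 1, node, acc =>
    match pvLookup parents_dict node with
    | none => acc
    | some (parent, relation) => chainB parents_dict fuel parent (acc ++ [relation])

-- 'r not in ("supports", "expands", 1)': a string never equals the int 1.
def pvBadRel (r : String) : Bool := !(r == "supports" || r == "expands")

-- Stage 2 of Source B: count the flipping relations, decide by parity.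
def get_node_viewpoint_alt (node : String) (parents_dict : List (String × String × String)) : String :=
  let relations := chainB parents_dict (parents_dict.length + 1) node []
  let flips := relations.countP pvBadRel
  if flips % 2 = 0 then "green" else "red"

-- ===== PRECONDITION & SPEC =====
-- Pre_ excludes cyclic parent chains: there A raises RecursionError (and B loops forever).
-- escapes f n: following parents from n leaves the dict within f steps.
def escapes (parents_dict : List (String × String × String)) : Nat → String → Bool
  | 0, n => (pvLookup parents_dict n).isNone
  | f + 1, n =>
    match pvLookup parents_dict n with
    | none => true
    | some (p, _) => escapes parents_dict f p

def Pre_get_node_viewpoint (node : String) (parents_dict : List (String × String × String)) : Prop :=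
  escapes parents_dict parents_dict.length node = true

instance (node : String) (parents_dict : List (String × String × String)) : Decidable (Pre_get_node_viewpoint node parents_dict) := by unfold Pre_get_node_viewpoint; infer_instance

def pvWitness_get_node_viewpoint : String × (List (String × String × String)) :=
  ("a", [("a", "b", "attacks"), ("b", "c", "supports")])

def Spec_get_node_viewpoint (node : String) (parents_dict : List (String × String × String)) (out : String) : Prop := out = get_node_viewpoint_alt node parents_dict
instance (node : String) (parents_dict : List (String × String × String)) (out : String) : Decidable (Spec_get_node_viewpoint node parents_dict out) := by unfold Spec_get_node_viewpoint; infer_instance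

-- ===== CLAIM (what is proved, stated in full; the proofs are below) =====
def Claim_equal_get_node_viewpoint : Prop := ∀ (node : String) (parents_dict : List (String × String × String)), Dom_get_node_viewpoint node parents_dict → Pre_get_node_viewpoint node parents_dict → Spec_get_node_viewpoint node parents_dict (get_node_viewpoint node parents_dict)

-- ===== LEMMAS AND PROOFS =====

-- The accumulator only prepends: chainB with acc is acc ++ chainB with [].
theorem chainB_acc (d : List (String × String × String)) :
    ∀ g n acc, chainB d g n acc = acc ++ chainB d g n [] := by
  intro g
  induction g with
  | zero => intro n acc; simp [chainB]
  | succ g ih =>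
    intro n acc
    simp only [chainB]
    cases h : pvLookup d n with
    | none => simp
    | some pr =>
      obtain ⟨p, r⟩ := pr
      simp only [h]
      rw [ih p (acc ++ [r]), ih p ([] ++ [r])]
      simp

-- Main invariant: if the chain from n escapes within f steps, then for any larger fuel g,
-- A's recursive color equals the parity of the bad relations along the collected chain.
theorem getA_parity (d : List (String × String × String)) :
    ∀ f n g, escapes d f n = true → f < g →
      getA d g n =
        (if (chainB d g n []).countP pvBadRel % 2 = 0 then "green" else "red") := by
  intro f
  induction f with
  | zero =>
    intro n g hesc hg
    obtain ⟨g, rfl⟩ := Nat.exists_eq_succ_of_ne_zero (by omega : g ≠ 0)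
    simp only [escapes, Option.isNone_iff_eq_none] at hesc
    simp [getA, chainB, hesc]
  | succ f ih =>
    intro n g hesc hg
    obtain ⟨g, rfl⟩ := Nat.exists_eq_succ_of_ne_zero (by omega : g ≠ 0)
    simp only [escapes] at hesc
    simp only [getA, chainB]
    rcases Option.eq_none_or_eq_some (pvLookup d n) with h | ⟨pr, h⟩
    · simp [h]
    · obtain ⟨p, r⟩ := pr
      rw [h] at hesc
      simp only [h]
      have hfg : f < g := Nat.lt_of_succ_lt_succ hg
      rw [ih p g hesc hfg, chainB_acc d g p ([] ++ [r])]
      simp only [List.nil_append, List.countP_append]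
      by_cases hr : r = "supports" ∨ r = "expands"
      · have hb : pvBadRel r = false := by
          rcases hr with hr | hr <;> simp [pvBadRel, hr]
        simp [hr, List.countP_cons, hb]
      · have hb : pvBadRel r = true := by
          simp only [pvBadRel, Bool.not_eq_true', Bool.or_eq_false_iff, beq_eq_false_iff_ne]
          exact ⟨fun h1 => hr (Or.inl h1), fun h2 => hr (Or.inr h2)⟩
        have hc : ([r].countP pvBadRel) = 1 := by simp [List.countP_cons, hb]
        rw [hc]
        rcases Nat.mod_two_eq_zero_or_one ((chainB d g p []).countP pvBadRel) with he | he
        · have : (1 + (chainB d g p []).countP pvBadRel) % 2 = 1 := by omega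
          simp [hr, he, this]
        · have : (1 + (chainB d g p []).countP pvBadRel) % 2 = 0 := by omega
          simp [hr, he, this]

-- ===== VERDICT (by name: the statement is the Claim_ definition above) =====
theorem get_node_viewpoint_spec : Claim_equal_get_node_viewpoint := by
  intro node parents_dict _ hpre
  unfold Spec_get_node_viewpoint get_node_viewpoint get_node_viewpoint_alt
  exact getA_parity parents_dict parents_dict.length node (parents_dict.length + 1) hpre
    (Nat.lt_succ_self _)
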